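-- pv_equiv track=rewrite | github.com/patt502090/Programming-Competitions | programmingTH/1052 Domino.py | ckr
-- ===== SOURCE A (Python) =====
-- def ckr(i, arr):
--     cnt = 1
--     ck = arr[i][1]
--     for j in range(i, len(arr) - 1):
--         dist = arr[j + 1][0] - arr[j][0]
--         if ck > dist:
--             cnt += 1
--             ck -= dist
--         else:
--             break
--     return cnt
-- ===== SOURCE B (Python) =====
-- def ckr(i, arr):
--     # B: fixed reach threshold + structural recursion counting falling dominoes,
--     # instead of A's iterative loop with a decreasing ck accumulator and counter.
--     reach = arr[i][0] + arr[i][1]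
--
--     def falls(j):
--         if j >= len(arr) or arr[j][0] >= reach:
--             return 0
--         return 1 + falls(j + 1)
--
--     return 1 + falls(i + 1)
-- ===== Notes on version B (the rewrite author's own statement) =====
-- stated objective: alternative
-- what changed: B precomputes a single fixed threshold reach = arr[i][0]+arr[i][1] and counts by structural recursion (1 + falls(j+1)) on the index, replacing A's iterative loop that maintains two mutable accumulators (a counter and a remainder ck decremented by each gap).
import Mathlib
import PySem

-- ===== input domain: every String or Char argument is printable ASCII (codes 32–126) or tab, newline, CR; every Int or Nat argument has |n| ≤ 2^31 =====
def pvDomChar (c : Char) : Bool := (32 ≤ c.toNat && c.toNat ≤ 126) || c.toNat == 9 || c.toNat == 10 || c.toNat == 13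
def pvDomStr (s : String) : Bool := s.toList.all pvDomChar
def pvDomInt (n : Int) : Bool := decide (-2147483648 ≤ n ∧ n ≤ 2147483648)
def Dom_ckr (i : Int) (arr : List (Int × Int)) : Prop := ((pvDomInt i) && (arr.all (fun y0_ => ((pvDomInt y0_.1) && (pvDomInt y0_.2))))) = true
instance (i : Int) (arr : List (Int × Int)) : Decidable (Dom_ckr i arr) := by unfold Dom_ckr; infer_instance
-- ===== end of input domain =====

-- B replaces A's iterative loop with its two mutable accumulators (counter, decreasing
-- remainder ck) by a fixed precomputed threshold and a structural recursion that counts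
-- the falling dominoes (objective: alternative decomposition).

-- arr[j] with Python's negative-index rule; default (0,0) is only reached outside
-- Pre_ckr (where the Python raises IndexError), so the ports are exact on Pre_ckr.
def pyAt (arr : List (Int × Int)) (j : Int) : Int × Int :=
  PySem.List.pyGetD arr j (0, 0)

-- ===== PORT A =====
-- for j in range(i, len(arr)-1): dist = arr[j+1][0]-arr[j][0]; if ck > dist: cnt+=1; ck-=dist else break
def ckrLoopA (arr : List (Int × Int)) (stop : Int) (j cnt ck : Int) : Int :=
  if j < stop then
    let dist := (pyAt arr (j + 1)).1 - (pyAt arr j).1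
    if ck > dist then ckrLoopA arr stop (j + 1) (cnt + 1) (ck - dist) else cnt
  else cnt
termination_by (stop - j).toNat
decreasing_by omega

def ckr (i : Int) (arr : List (Int × Int)) : Int :=
  ckrLoopA arr ((arr.length : Int) - 1) i 1 (pyAt arr i).2

-- ===== PORT B =====
-- def falls(j): if j >= len(arr) or arr[j][0] >= reach: return 0; return 1 + falls(j+1)
def falls (arr : List (Int × Int)) (reach : Int) (j : Int) : Int :=
  if (arr.length : Int) ≤ j ∨ reach ≤ (pyAt arr j).1 then 0
  else 1 + falls arr reach (j + 1)
termination_by ((arr.length : Int) - j).toNat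
decreasing_by omega

def ckr_alt (i : Int) (arr : List (Int × Int)) : Int :=
  let reach := (pyAt arr i).1 + (pyAt arr i).2
  1 + falls arr reach (i + 1)

-- ===== PRECONDITION & SPEC =====
-- Pre_ckr excludes exactly the inputs where Python A raises IndexError on arr[i]
-- (index out of range, including the empty list).
def Pre_ckr (i : Int) (arr : List (Int × Int)) : Prop :=
  -(arr.length : Int) ≤ i ∧ i < (arr.length : Int)
instance (i : Int) (arr : List (Int × Int)) : Decidable (Pre_ckr i arr) := by
  unfold Pre_ckr; infer_instance

def pvWitness_ckr : Int × (List (Int × Int)) := (0, [(0, 3), (1, 1), (3, 5)])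

def Spec_ckr (i : Int) (arr : List (Int × Int)) (out : Int) : Prop := out = ckr_alt i arr
instance (i : Int) (arr : List (Int × Int)) (out : Int) : Decidable (Spec_ckr i arr out) := by unfold Spec_ckr; infer_instance

-- ===== CLAIM (what is proved, stated in full; the proofs are below) =====
def Claim_equal_ckr : Prop := ∀ (i : Int) (arr : List (Int × Int)), Dom_ckr i arr → Pre_ckr i arr → Spec_ckr i arr (ckr i arr)

-- ===== LEMMAS AND PROOFS =====

-- Invariant: A's ck at step j equals reach - arr[j][0]; the number of further
-- iterations A's loop makes from j is exactly falls arr reach (j+1).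
theorem loopA_eq_falls (arr : List (Int × Int)) (reach : Int) (j cnt : Int) :
    ckrLoopA arr ((arr.length : Int) - 1) j cnt (reach - (pyAt arr j).1)
      = cnt + falls arr reach (j + 1) := by
  rw [ckrLoopA, falls]
  by_cases hj : j < (arr.length : Int) - 1
  · simp only [hj, if_pos]
    by_cases hc : (pyAt arr (j + 1)).1 < reach
    · have hcond : reach - (pyAt arr j).1 > (pyAt arr (j + 1)).1 - (pyAt arr j).1 := by omega
      rw [if_pos hcond, if_neg (by omega)]
      have : reach - (pyAt arr j).1 - ((pyAt arr (j + 1)).1 - (pyAt arr j).1)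
          = reach - (pyAt arr (j + 1)).1 := by ring
      rw [this, loopA_eq_falls arr reach (j + 1) (cnt + 1)]
      omega
    · have hcond : ¬ (reach - (pyAt arr j).1 > (pyAt arr (j + 1)).1 - (pyAt arr j).1) := by omega
      rw [if_neg hcond, if_pos (Or.inr (by omega))]
      omega
  · rw [if_neg hj, if_pos (Or.inl (by omega))]
    omega
termination_by ((arr.length : Int) - 1 - j).toNat
decreasing_by omega

-- ===== VERDICT (by name: the statement is the Claim_ definition above) =====
theorem ckr_spec : Claim_equal_ckr := by
  intro i arr _ _
  unfold Spec_ckr ckr ckr_alt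
  have h := loopA_eq_falls arr ((pyAt arr i).1 + (pyAt arr i).2) i 1
  have h2 : (pyAt arr i).1 + (pyAt arr i).2 - (pyAt arr i).1 = (pyAt arr i).2 := by ring
  rw [h2] at h
  rw [h]
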